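-- pv_equiv track=rewrite | github.com/FriedrichHermann/Jarvis | Second Try/app/model/model.py | lower_split
-- ===== SOURCE A (Python) =====
-- def lower_split(p):
--     try:
--         words=[]
--         for i in range(len(p)):
--             words.extend(p[i].lower().split(","))
--
--         return words
--     except:
--         None
-- ===== SOURCE B (Python) =====
-- def lower_split(p):
--     try:
--         return ",".join(p).lower().split(",") if p else []
--     except:
--         None
-- ===== Notes on version B (the rewrite author's own statement) =====
-- stated objective: simpler
-- what changed: The per-element index loop with extend is replaced by a single join-then-split expression: join the list on ',', lowercase once, and split once, with an empty-list guard.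
import Mathlib
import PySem

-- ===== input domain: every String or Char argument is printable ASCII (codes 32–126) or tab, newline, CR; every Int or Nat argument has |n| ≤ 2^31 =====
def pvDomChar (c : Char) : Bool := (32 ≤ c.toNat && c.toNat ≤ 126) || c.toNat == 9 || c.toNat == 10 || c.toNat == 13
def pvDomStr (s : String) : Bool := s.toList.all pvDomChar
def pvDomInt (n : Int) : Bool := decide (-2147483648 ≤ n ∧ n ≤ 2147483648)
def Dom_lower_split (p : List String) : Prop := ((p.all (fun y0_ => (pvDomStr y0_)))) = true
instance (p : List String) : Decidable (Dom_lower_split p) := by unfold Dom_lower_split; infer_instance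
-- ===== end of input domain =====

-- B replaces A's index loop with a single join-then-split expression (simpler); same return value.

-- ===== PORT A =====
-- for i in range(len(p)): words.extend(p[i].lower().split(","))
def lower_split (p : List String) : List String :=
  (PySem.List.pyRange 0 (PySem.List.len p) 1).foldl
    (fun words i =>
      words ++
        (PySem.Chars.splitOn (PySem.Str.lower (PySem.List.pyGetD p i "")).toList ",".toList).map
          String.ofList)
    []

-- ===== PORT B =====
-- return ",".join(p).lower().split(",") if p else []
def lower_split_alt (p : List String) : List String :=
  if p = [] then []
  else
    (PySem.Chars.splitOn (PySem.Str.lower (PySem.Str.join "," p)).toList ",".toList).map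
      String.ofList

-- ===== PRECONDITION & SPEC =====
def Spec_lower_split (p : List String) (out : List String) : Prop := out = lower_split_alt p
instance (p : List String) (out : List String) : Decidable (Spec_lower_split p out) := by unfold Spec_lower_split; infer_instance

-- ===== CLAIM (what is proved, stated in full; the proofs are below) =====
def Claim_equal_lower_split : Prop := ∀ (p : List String), Dom_lower_split p → Spec_lower_split p (lower_split p)

-- ===== LEMMAS AND PROOFS =====

-- Python's single-char split is List.splitOnP on the characters.
theorem splitOn_go_char (c : Char) : ∀ (fuel : Nat) (l cur : List Char) (acc : List (List Char)),
    l.length < fuel →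
    PySem.Chars.splitOn.go [c] fuel l cur acc =
      acc.reverse ++ (List.splitOnP (· == c) l).modifyHead (cur.reverse ++ ·) := by
  intro fuel
  induction fuel with
  | zero => intro l cur acc h; omega
  | succ f ih =>
    intro l cur acc h
    cases l with
    | nil => simp [PySem.Chars.splitOn.go]
    | cons ch rest =>
      by_cases hc : ch = c
      · subst hc
        have hpre : List.isPrefixOf [ch] (ch :: rest) = true := by
          simp [List.isPrefixOf]
        rw [show PySem.Chars.splitOn.go [ch] (f + 1) (ch :: rest) cur acc =
              PySem.Chars.splitOn.go [ch] f rest [] (cur.reverse :: acc) by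
            simp [PySem.Chars.splitOn.go, hpre]]
        rw [ih rest [] (cur.reverse :: acc) (by simpa using h)]
        rw [List.splitOnP_cons]
        simp only [beq_self_eq_true, List.reverse_cons, List.append_assoc,
          List.cons_append, List.nil_append]
        congr 1
        cases List.splitOnP (fun x => x == ch) rest <;> simp
      · have hpre : List.isPrefixOf [c] (ch :: rest) = false := by
          simp only [List.isPrefixOf, Bool.and_eq_false_iff, beq_eq_false_iff_ne, ne_eq]
          exact Or.inl (fun hh => hc hh.symm)
        rw [show PySem.Chars.splitOn.go [c] (f + 1) (ch :: rest) cur acc =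
              PySem.Chars.splitOn.go [c] f rest (ch :: cur) acc by
            simp [PySem.Chars.splitOn.go, hpre]]
        rw [ih rest (ch :: cur) acc (by simpa using h)]
        rw [List.splitOnP_cons]
        have : (ch == c) = false := by simp [hc]
        simp only [this, Bool.false_eq_true, if_false, List.modifyHead_modifyHead]
        have hf : (fun x => (ch :: cur).reverse ++ x) =
            ((fun x => cur.reverse ++ x) ∘ List.cons ch) := by
          funext x; simp
        rw [hf]

theorem splitOn_char (l : List Char) (c : Char) :
    PySem.Chars.splitOn l [c] = List.splitOnP (· == c) l := by
  unfold PySem.Chars.splitOn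
  rw [splitOn_go_char c (l.length + 1) l [] [] (by omega)]
  simp only [List.reverse_nil, List.nil_append]
  cases List.splitOnP (fun x => x == c) l <;> simp

theorem lower_append_comma (a b : List Char) :
    PySem.Chars.lower (a ++ [','] ++ b) =
      PySem.Chars.lower a ++ ',' :: PySem.Chars.lower b := by
  simp [PySem.Chars.lower, show PySem.Chars.lowerChar ',' = ',' from by decide]

-- the per-element value A appends for each string
def gA (s : String) : List String :=
  (List.splitOnP (· == ',') (PySem.Chars.lower s.toList)).map String.ofList

theorem lower_split_eq_flatMap (p : List String) : lower_split p = p.flatMap gA := by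
  unfold lower_split
  rw [PySem.List.foldl_pyRange_zero_pyGetD p ""
    (fun words s =>
      words ++
        (PySem.Chars.splitOn (PySem.Str.lower s).toList ",".toList).map String.ofList) []]
  rw [PySem.List.foldl_append_eq_flatMap]
  simp only [List.nil_append]
  congr 1
  funext s
  simp [gA, PySem.Str.toList_lower, splitOn_char, show (",".toList) = [','] from rfl]

theorem alt_cons_cons (s r : String) (t : List String) :
    lower_split_alt (s :: r :: t) = gA s ++ lower_split_alt (r :: t) := by
  unfold lower_split_alt
  simp only [if_neg, List.cons_ne_nil, not_false_eq_true]
  rw [PySem.Str.toList_lower, PySem.Str.toList_join]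
  simp only [List.map_cons]
  rw [PySem.Chars.join_cons_cons]
  rw [show (",".toList) = [','] from rfl]
  rw [lower_append_comma, splitOn_char, List.splitOnP_append_cons _ _ _ _ (by simp), List.map_append]
  rw [gA, PySem.Str.toList_lower, PySem.Str.toList_join, splitOn_char]
  simp only [List.map_cons, show (",".toList) = [','] from rfl]

theorem main_eq (p : List String) : lower_split p = lower_split_alt p := by
  rw [lower_split_eq_flatMap]
  induction p with
  | nil => simp [lower_split_alt]
  | cons s rest ih =>
    cases rest with
    | nil =>
      simp only [List.flatMap_cons, List.flatMap_nil, List.append_nil]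
      unfold lower_split_alt
      simp only [reduceCtorEq, if_neg, not_false_eq_true]
      rw [gA, PySem.Str.toList_lower, PySem.Str.toList_join, List.map_cons, List.map_nil,
        PySem.Chars.join_singleton, show (",".toList) = [','] from rfl, splitOn_char]
    | cons r t =>
      rw [List.flatMap_cons, alt_cons_cons, ih]

-- ===== VERDICT (by name: the statement is the Claim_ definition above) =====
theorem lower_split_spec : Claim_equal_lower_split := by
  intro p _
  unfold Spec_lower_split
  exact main_eq p
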